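-- pv_equiv track=rewrite | github.com/ksparavec/traceroute_simulator | src/simulators/batch_command_generator.py | _extract_route_signature
-- ===== SOURCE A (Python) =====
-- def _extract_route_signature(route):
--     """Extract route signature for TOS duplicate detection (from working code)."""
--     parts = route.split()
--
--     # Extract components
--     dest = parts[0] if parts else ""
--     dev = None
--     metric = None
--     proto = None
--     scope = None
--     src = None
--
--     for i, part in enumerate(parts):
--         if part == "dev" and i + 1 < len(parts):
--             dev = parts[i + 1]
--         elif part == "metric" and i + 1 < len(parts):
--             metric = parts[i + 1]
--         elif part == "proto" and i + 1 < len(parts):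
--             proto = parts[i + 1]
--         elif part == "scope" and i + 1 < len(parts):
--             scope = parts[i + 1]
--         elif part == "src" and i + 1 < len(parts):
--             src = parts[i + 1]
--
--     # Signature without source IP (for detecting duplicates that differ only by src)
--     signature = (dest, dev, metric, proto, scope)
--     return signature, src
-- ===== SOURCE B (Python) =====
-- def _extract_route_signature(route):
--     """Per-field backward search: for each keyword, scan the tokens from the
--     end for its last occurrence at a non-final position and take the token
--     that follows it (last occurrence wins, as in a forward overwrite)."""
--     parts = route.split()
--
--     def last_value(key):
--         i = len(parts) - 2
--         while i >= 0:
--             if parts[i] == key: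
--                 return parts[i + 1]
--             i -= 1
--         return None
--
--     dest = parts[0] if parts else ""
--     signature = (dest, last_value("dev"), last_value("metric"),
--                  last_value("proto"), last_value("scope"))
--     return signature, last_value("src")
-- ===== Notes on version B (the rewrite author's own statement) =====
-- stated objective: alternative
-- what changed: A threads five mutable variables through one forward enumerate loop with i+1 bound checks; B instead performs five independent backward searches, scanning the token list from the end for each keyword's last non-final occurrence and returning the following token immediately (early exit), with no shared loop state.
import Mathlib
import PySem

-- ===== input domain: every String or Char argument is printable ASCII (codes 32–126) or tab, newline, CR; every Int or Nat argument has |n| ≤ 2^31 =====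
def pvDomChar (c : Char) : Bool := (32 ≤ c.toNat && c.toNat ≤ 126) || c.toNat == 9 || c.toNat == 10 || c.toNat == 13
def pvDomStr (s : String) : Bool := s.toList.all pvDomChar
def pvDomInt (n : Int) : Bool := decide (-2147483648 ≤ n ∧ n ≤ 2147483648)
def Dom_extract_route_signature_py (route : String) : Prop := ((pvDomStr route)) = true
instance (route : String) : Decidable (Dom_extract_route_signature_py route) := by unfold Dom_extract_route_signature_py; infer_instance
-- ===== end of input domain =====

-- B replaces A's single forward pass threading five mutable variables by five independent
-- backward searches (last keyword occurrence wins); objective: alternative, same return value.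

-- ===== PORT A =====
-- A's loop body (named for the proofs): the elif chain over (i, part);
-- `dev = parts[i+1]` is stored as the Option value `pyGet? parts (i+1)` (always `some _` under the guard).
def pvStepA (parts : List String)
    (st : Option String × Option String × Option String × Option String × Option String)
    (ip : Int × String) :
    Option String × Option String × Option String × Option String × Option String :=
  let (dev, metric, proto, scope, src) := st
  if ip.2 = "dev" ∧ ip.1 + 1 < (parts.length : Int) then
    (PySem.List.pyGet? parts (ip.1 + 1), metric, proto, scope, src)
  else if ip.2 = "metric" ∧ ip.1 + 1 < (parts.length : Int) then
    (dev, PySem.List.pyGet? parts (ip.1 + 1), proto, scope, src)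
  else if ip.2 = "proto" ∧ ip.1 + 1 < (parts.length : Int) then
    (dev, metric, PySem.List.pyGet? parts (ip.1 + 1), scope, src)
  else if ip.2 = "scope" ∧ ip.1 + 1 < (parts.length : Int) then
    (dev, metric, proto, PySem.List.pyGet? parts (ip.1 + 1), src)
  else if ip.2 = "src" ∧ ip.1 + 1 < (parts.length : Int) then
    (dev, metric, proto, scope, PySem.List.pyGet? parts (ip.1 + 1))
  else st

def extract_route_signature_py (route : String) :
    (String × Option String × Option String × Option String × Option String) × Option String :=
  let parts := PySem.Str.split₀ route
  let dest := match parts with | [] => "" | p :: _ => p   -- parts[0] if parts else ""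
  let st := (PySem.List.enumerate parts).foldl (pvStepA parts) (none, none, none, none, none)
  ((dest, st.1, st.2.1, st.2.2.1, st.2.2.2.1), st.2.2.2.2)

-- ===== PORT B =====
-- Source B's `last_value`: the while loop `i = len(parts)-2; while i >= 0: … i -= 1`,
-- transcribed with fuel m = i + 1 (so the call uses m = len parts - 1).
-- Indices i and i+1 are always in range here, so `getD _ ""` is exactly Python's parts[i].
def pvLastVal (parts : List String) (key : String) : Nat → Option String
  | 0 => none
  | Nat.succ i =>
    if parts.getD i "" = key then some (parts.getD (i + 1) "")
    else pvLastVal parts key i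

def extract_route_signature_py_alt (route : String) :
    (String × Option String × Option String × Option String × Option String) × Option String :=
  let parts := PySem.Str.split₀ route
  let dest := match parts with | [] => "" | p :: _ => p   -- parts[0] if parts else ""
  ((dest,
    pvLastVal parts "dev" (parts.length - 1),
    pvLastVal parts "metric" (parts.length - 1),
    pvLastVal parts "proto" (parts.length - 1),
    pvLastVal parts "scope" (parts.length - 1)),
   pvLastVal parts "src" (parts.length - 1))

-- ===== PRECONDITION & SPEC =====
def Spec_extract_route_signature_py (route : String) (out : (String × Option String × Option String × Option String × Option String) × Option String) : Prop := out = extract_route_signature_py_alt route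
instance (route : String) (out : (String × Option String × Option String × Option String × Option String) × Option String) : Decidable (Spec_extract_route_signature_py route out) := by unfold Spec_extract_route_signature_py; infer_instance

-- ===== CLAIM (what is proved, stated in full; the proofs are below) =====
def Claim_equal_extract_route_signature_py : Prop := ∀ (route : String), Dom_extract_route_signature_py route → Spec_extract_route_signature_py route (extract_route_signature_py route)

-- ===== LEMMAS AND PROOFS =====

-- orElse on Option, written out so simp/cases work plainly
def pvOrE (a b : Option String) : Option String :=
  match a with | some v => some v | none => b

-- backward search over indices m-1, m-2, …, k (proof-only generalization of pvLastVal)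
def pvSearch (full : List String) (key : String) (k : Nat) : Nat → Option String
  | 0 => none
  | Nat.succ m =>
    if m < k then none
    else if full.getD m "" = key then some (full.getD (m + 1) "")
    else pvSearch full key k m

lemma pvOrE_none (a : Option String) : pvOrE a none = a := by cases a <;> rfl

lemma pvOrE_assoc (a b c : Option String) :
    pvOrE (pvOrE a b) c = pvOrE a (pvOrE b c) := by cases a <;> rfl

lemma pvSearch_none (full : List String) (key : String) :
    ∀ m k, m ≤ k → pvSearch full key k m = none := by
  intro m
  induction m with
  | zero => intro k _; rfl
  | succ m ih =>
    intro k h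
    simp only [pvSearch]
    rw [if_pos (by omega)]

lemma pvLastVal_eq (full : List String) (key : String) :
    ∀ m, pvLastVal full key m = pvSearch full key 0 m := by
  intro m
  induction m with
  | zero => rfl
  | succ m ih => simp only [pvLastVal, pvSearch, Nat.not_lt_zero, if_false, ih]

lemma pvSearch_split (full : List String) (key : String) :
    ∀ m k, k < m →
      pvSearch full key k m
        = pvOrE (pvSearch full key (k + 1) m)
            (if full.getD k "" = key then some (full.getD (k + 1) "") else none) := by
  intro m
  induction m with
  | zero => intro k h; exact absurd h k.not_lt_zero
  | succ m ih =>
    intro k h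
    by_cases hk : k = m
    · subst hk
      simp only [pvSearch, if_neg (lt_irrefl k), if_pos (Nat.lt_succ_self k)]
      by_cases hc : full.getD k "" = key
      · simp only [if_pos hc, pvOrE]
      · simp only [if_neg hc, pvOrE, pvSearch_none full key k k (le_refl _)]
    · have hklt : k < m := by omega
      simp only [pvSearch, if_neg (show ¬ m < k by omega), if_neg (show ¬ m < k + 1 by omega)]
      by_cases hm2 : full.getD m "" = key
      · simp only [if_pos hm2, pvOrE]
      · simp only [if_neg hm2]
        exact ih k hklt

-- Core invariant: A's enumerate fold over the suffix `full.drop k` from state st has, in each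
-- component, the result of B's backward search over indices [k, len-2], falling back to st.
lemma pv_inv : ∀ (xs full : List String) (k : Nat)
    (st : Option String × Option String × Option String × Option String × Option String),
    full.drop k = xs →
    (PySem.List.enumerate xs (k : Int)).foldl (pvStepA full) st
      = (pvOrE (pvSearch full "dev" k (full.length - 1)) st.1,
         pvOrE (pvSearch full "metric" k (full.length - 1)) st.2.1,
         pvOrE (pvSearch full "proto" k (full.length - 1)) st.2.2.1,
         pvOrE (pvSearch full "scope" k (full.length - 1)) st.2.2.2.1,
         pvOrE (pvSearch full "src" k (full.length - 1)) st.2.2.2.2) := by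
  intro xs
  induction xs with
  | nil =>
    intro full k st h
    obtain ⟨d, m, p, s, r⟩ := st
    have hk : full.length ≤ k := by
      by_contra hlt
      have : full.drop k ≠ [] := by
        apply List.ne_nil_of_length_pos
        rw [List.length_drop]; omega
      exact this h
    rw [pvSearch_none full "dev" _ _ (by omega), pvSearch_none full "metric" _ _ (by omega),
        pvSearch_none full "proto" _ _ (by omega), pvSearch_none full "scope" _ _ (by omega),
        pvSearch_none full "src" _ _ (by omega)]
    simp [PySem.List.enumerate, pvOrE]
  | cons x rest ih =>
    intro full k st h
    obtain ⟨d, m, p, s, r⟩ := st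
    have hlen : full.length = k + rest.length + 1 := by
      have := List.length_drop (l := full) (i := k)
      rw [h] at this; simp at this
      by_cases hk : k ≤ full.length
      · omega
      · exfalso
        have : full.drop k = [] := List.drop_eq_nil_of_le (by omega)
        rw [h] at this; simp at this
    have hx : full.getD k "" = x := by
      have : full[k]? = some x := by rw [← List.head?_drop, h]; rfl
      simp [List.getD, this]
    cases rest with
    | nil =>
      have hguard : ¬ ((k : Int) + 1 < (full.length : Int)) := by
        rw [hlen]; push_cast [List.length_nil]; omega
      rw [pvSearch_none full "dev" _ _ (by omega), pvSearch_none full "metric" _ _ (by omega),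
          pvSearch_none full "proto" _ _ (by omega), pvSearch_none full "scope" _ _ (by omega),
          pvSearch_none full "src" _ _ (by omega)]
      simp [PySem.List.enumerate_cons, PySem.List.enumerate_nil, pvStepA, hguard, pvOrE]
    | cons y ys =>
      have hdrop1 : full.drop (k + 1) = y :: ys := by
        rw [← List.tail_drop, h]; rfl
      have hklt : k < full.length - 1 := by simp at hlen ⊢; omega
      have hguard : (k : Int) + 1 < (full.length : Int) := by
        rw [hlen]; push_cast [List.length_cons]; omega
      have hy : full.getD (k + 1) "" = y := by
        have : full[k+1]? = some y := by rw [← List.head?_drop, hdrop1]; rfl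
        simp [List.getD, this]
      have hget : PySem.List.pyGet? full ((k : Int) + 1) = some y := by
        have hcast : (k : Int) + 1 = ((k + 1 : Nat) : Int) := by push_cast; ring
        rw [hcast, PySem.List.pyGet?_natCast]
        rw [← List.head?_drop, hdrop1]; rfl
      rw [PySem.List.enumerate_cons, List.foldl_cons]
      have step_eq : pvStepA full (d, m, p, s, r) ((k : Int), x)
          = (if x = "dev" then some y else d,
             if x = "metric" then some y else m,
             if x = "proto" then some y else p,
             if x = "scope" then some y else s,
             if x = "src" then some y else r) := by
        by_cases h1 : x = "dev"
        · subst h1; simp [pvStepA, hguard, hget]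
        · by_cases h2 : x = "metric"
          · subst h2; simp [pvStepA, hguard, hget]
          · by_cases h3 : x = "proto"
            · subst h3; simp [pvStepA, hguard, hget]
            · by_cases h4 : x = "scope"
              · subst h4; simp [pvStepA, hguard, hget]
              · by_cases h5 : x = "src"
                · subst h5; simp [pvStepA, hguard, hget]
                · simp [pvStepA, h1, h2, h3, h4, h5]
      rw [step_eq]
      have hcast : (k : Int) + 1 = ((k + 1 : Nat) : Int) := by push_cast; ring
      rw [hcast, ih full (k + 1) _ hdrop1]
      have comp : ∀ key v,
          pvOrE (pvSearch full key (k + 1) (full.length - 1)) (if x = key then some y else v)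
            = pvOrE (pvSearch full key k (full.length - 1)) v := by
        intro key v
        rw [pvSearch_split full key (full.length - 1) k hklt, pvOrE_assoc, hx, hy]
        by_cases hxk : x = key
        · simp [hxk, pvOrE]
        · simp [hxk, pvOrE]
      simp only [comp]

-- ===== VERDICT (by name: the statement is the Claim_ definition above) =====
theorem extract_route_signature_py_spec : Claim_equal_extract_route_signature_py := by
  intro route _
  unfold Spec_extract_route_signature_py extract_route_signature_py extract_route_signature_py_alt
  have h := pv_inv (PySem.Str.split₀ route) (PySem.Str.split₀ route) 0
    (none, none, none, none, none) (by simp)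
  simp only [Int.natCast_zero] at h
  simp only [h, pvOrE_none, pvLastVal_eq]
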